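-- pv_equiv track=rewrite | github.com/MMTU-Benchmark/MMTU | evaluators/list_to_table_evaluator.py | _evaluate_one
-- ===== SOURCE A (Python) =====
-- def _evaluate_one(y_true, y_pred):
--     y_pred_rows = y_pred.split("\n")
--     y_pred_rows = ["||".join([item.strip() for item in row.split("||")]) for row in y_pred_rows]
--     y_pred = "\n".join(y_pred_rows)
--     if y_true == y_pred:
--         correct = 1
--     else:
--         correct = 0
--     res = {
--         "correct": correct
--     }
--     return res
-- ===== SOURCE B (Python) =====
-- def _evaluate_one(y_true, y_pred):
--     # single left-to-right pass: rebuild y_pred with every cell (between '||'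
--     # separators and line breaks) stripped, then compare once with y_true
--     out = []
--     cur = []
--     s = y_pred
--     n = len(s)
--     i = 0
--     while i < n:
--         c = s[i]
--         if c == "\n":
--             out.append("".join(cur).strip())
--             out.append("\n")
--             cur = []
--             i += 1
--         elif c == "|" and i + 1 < n and s[i + 1] == "|":
--             out.append("".join(cur).strip())
--             out.append("||")
--             cur = []
--             i += 2
--         else:
--             cur.append(c)
--             i += 1
--     out.append("".join(cur).strip())
--     return {"correct": 1 if y_true == "".join(out) else 0}
-- ===== Notes on version B (the rewrite author's own statement) =====
-- stated objective: alternative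
-- what changed: A normalizes y_pred via a split('\n') / per-row split('||')+strip / join pipeline building intermediate lists; B rebuilds the normalized string in a single left-to-right character scan with one cell buffer, stripping each cell as it is flushed at a '||' or newline boundary, then compares once.
import Mathlib
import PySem

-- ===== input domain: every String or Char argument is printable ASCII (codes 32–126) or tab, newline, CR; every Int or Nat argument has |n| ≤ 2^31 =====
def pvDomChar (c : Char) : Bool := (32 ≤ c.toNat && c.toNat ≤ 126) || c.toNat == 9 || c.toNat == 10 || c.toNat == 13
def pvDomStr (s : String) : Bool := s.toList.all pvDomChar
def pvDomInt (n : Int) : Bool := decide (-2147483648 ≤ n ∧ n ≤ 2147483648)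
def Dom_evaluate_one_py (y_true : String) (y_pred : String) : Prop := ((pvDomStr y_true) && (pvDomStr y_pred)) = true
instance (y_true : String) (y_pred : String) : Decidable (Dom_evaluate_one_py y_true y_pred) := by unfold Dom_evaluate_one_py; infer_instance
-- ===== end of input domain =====

-- B replaces A's split/strip/join pipeline by a single-pass scanner that strips each
-- cell as it is flushed at a '||' or '\n' boundary (objective: alternative decomposition).

-- ===== PORT A =====
def evaluate_one_py (y_true : String) (y_pred : String) : List (String × Int) :=
  let rows := PySem.Chars.splitOn y_pred.toList ['\n']
  let rows2 := rows.map (fun row =>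
    PySem.Chars.join ['|', '|'] ((PySem.Chars.splitOn row ['|', '|']).map PySem.Chars.strip))
  let ypred2 := PySem.Chars.join ['\n'] rows2
  let correct : Int := if y_true.toList = ypred2 then 1 else 0
  [("correct", correct)]

-- ===== PORT B =====
-- the while loop of Source B: cur is the pending-cell buffer, the returned list is the
-- normalized string built so far (out) continued by the recursion
def pvScan : List Char → List Char → List Char
  | [], cur => PySem.Chars.strip cur
  | c :: rest, cur =>
    if c = '\n' then
      PySem.Chars.strip cur ++ '\n' :: pvScan rest []
    else if c = '|' ∧ rest.head? = some '|' then
      PySem.Chars.strip cur ++ '|' :: '|' :: pvScan rest.tail []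
    else
      pvScan rest (cur ++ [c])
termination_by l _ => l.length
decreasing_by
  all_goals simp [List.length_tail]

def evaluate_one_py_alt (y_true : String) (y_pred : String) : List (String × Int) :=
  [("correct", if y_true.toList = pvScan y_pred.toList [] then (1 : Int) else 0)]

-- ===== PRECONDITION & SPEC =====
def Spec_evaluate_one_py (y_true : String) (y_pred : String) (out : List (String × Int)) : Prop := out = evaluate_one_py_alt y_true y_pred
instance (y_true : String) (y_pred : String) (out : List (String × Int)) : Decidable (Spec_evaluate_one_py y_true y_pred out) := by unfold Spec_evaluate_one_py; infer_instance

-- ===== CLAIM (what is proved, stated in full; the proofs are below) =====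
def Claim_equal_evaluate_one_py : Prop := ∀ (y_true : String) (y_pred : String), Dom_evaluate_one_py y_true y_pred → Spec_evaluate_one_py y_true y_pred (evaluate_one_py y_true y_pred)

-- ===== LEMMAS AND PROOFS =====

-- reference splitter: fuel-free version of PySem.Chars.splitOn
def pvConsApp (x : List Char) : List (List Char) → List (List Char)
  | [] => [x]
  | h :: t => (x ++ h) :: t

def pvSplit (sep : List Char) (l : List Char) : List (List Char) :=
  if hs : sep = [] then [l]
  else if hp : sep.isPrefixOf l ∧ l ≠ [] then [] :: pvSplit sep (l.drop sep.length)
  else match l with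
    | [] => [[]]
    | c :: rest => pvConsApp [c] (pvSplit sep rest)
termination_by l.length
decreasing_by
  · have h1 : 1 ≤ sep.length := by
      cases sep with
      | nil => exact absurd rfl hs
      | cons a t => simp
    have h2 : l ≠ [] := hp.2
    have h3 : 1 ≤ l.length := by
      cases l with
      | nil => exact absurd rfl h2
      | cons a t => simp
    simp; omega
  · simp

theorem pvSplit_ne_nil (sep l : List Char) : pvSplit sep l ≠ [] := by
  unfold pvSplit
  split
  · simp
  · split
    · simp
    · split
      · simp
      · simp [pvConsApp]
        split <;> simp

theorem pvConsApp_nil (ps : List (List Char)) (h : ps ≠ []) : pvConsApp [] ps = ps := by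
  cases ps with
  | nil => exact absurd rfl h
  | cons a t => simp [pvConsApp]

theorem pvConsApp_append (x y : List Char) (ps : List (List Char)) :
    pvConsApp (x ++ y) ps = pvConsApp x (pvConsApp y ps) := by
  cases ps <;> simp [pvConsApp]

theorem pvGo_eq (sep : List Char) (hs : sep ≠ []) :
    ∀ fuel l cur acc, l.length < fuel →
      PySem.Chars.splitOn.go sep fuel l cur acc =
        acc.reverse ++ pvConsApp cur.reverse (pvSplit sep l) := by
  intro fuel
  induction fuel with
  | zero => intro l cur acc h; omega
  | succ fuel ih =>
    intro l cur acc h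
    cases l with
    | nil =>
      rw [PySem.Chars.splitOn.go.eq_def]
      rw [pvSplit]
      simp [hs, pvConsApp]
    | cons c rest =>
      rw [PySem.Chars.splitOn.go.eq_def]
      simp only []
      by_cases hpre : sep.isPrefixOf (c :: rest)
      · have h1 : 1 ≤ sep.length := by
          cases sep with
          | nil => exact absurd rfl hs
          | cons a t => simp
        rw [if_pos hpre, ih _ _ _ (by simp at h ⊢; omega)]
        conv_rhs => rw [pvSplit]
        rw [dif_neg hs, dif_pos ⟨hpre, by simp⟩]
        have hne := pvSplit_ne_nil sep (List.drop sep.length (c :: rest))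
        cases hps : pvSplit sep (List.drop sep.length (c :: rest)) with
        | nil => exact absurd hps hne
        | cons p t => simp [pvConsApp]
      · rw [if_neg hpre, ih _ _ _ (by simp at h ⊢; omega)]
        conv_rhs => rw [pvSplit]
        rw [dif_neg hs, dif_neg (by simp [hpre])]
        simp only [List.reverse_cons]
        rw [pvConsApp_append]

theorem pvSplitOn_eq (sep l : List Char) (hs : sep ≠ []) :
    PySem.Chars.splitOn l sep = pvSplit sep l := by
  rw [PySem.Chars.splitOn, pvGo_eq sep hs _ _ _ _ (by omega)]
  simp [pvConsApp_nil _ (pvSplit_ne_nil sep l)]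

-- single-character separator: a prefix without the separator char is carried into the head piece
theorem pvSplit_single_append (d : Char) (a r : List Char) (ha : d ∉ a) :
    pvSplit [d] (a ++ r) = pvConsApp a (pvSplit [d] r) := by
  induction a with
  | nil => simp [pvConsApp_nil _ (pvSplit_ne_nil [d] r)]
  | cons c a' ih =>
    have hc : d ≠ c := fun h => ha (h ▸ List.mem_cons_self)
    have ha' : d ∉ a' := fun h => ha (List.mem_cons_of_mem _ h)
    rw [List.cons_append, pvSplit, dif_neg (by simp),
      dif_neg (by simp [List.isPrefixOf]; exact hc)]
    show pvConsApp [c] (pvSplit [d] (a' ++ r)) = _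
    rw [ih ha', ← pvConsApp_append]
    rfl

-- a string free of the separator is a single piece
theorem pvSplit_not_infix (sep s : List Char) (hs : sep ≠ []) (h : ¬ sep <:+: s) :
    pvSplit sep s = [s] := by
  induction s with
  | nil =>
    rw [pvSplit, dif_neg hs, dif_neg (by simp)]
  | cons c r ih =>
    have hp : ¬ sep.isPrefixOf (c :: r) := fun hpf =>
      h ((List.isPrefixOf_iff_prefix.mp hpf).isInfix)
    rw [pvSplit, dif_neg hs, dif_neg (by simp [hp])]
    show pvConsApp [c] (pvSplit sep r) = _
    rw [ih (fun hi => h (List.infix_cons hi))]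
    rfl

-- '||' splitter: an infix-free prefix not ending in '|' is split off before an explicit separator
theorem pvSplit_bar (a r : List Char) (ha : ¬ ['|', '|'] <:+: a)
    (hlast : a.getLast? ≠ some '|') :
    pvSplit ['|', '|'] (a ++ '|' :: '|' :: r) = a :: pvSplit ['|', '|'] r := by
  induction a with
  | nil =>
    rw [List.nil_append, pvSplit, dif_neg (by simp),
      dif_pos ⟨by simp [List.isPrefixOf], by simp⟩]
    simp
  | cons c a' ih =>
    have hpre : ¬ (['|', '|'].isPrefixOf (c :: (a' ++ '|' :: '|' :: r))) := by
      intro hpf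
      cases a' with
      | nil =>
        simp [List.isPrefixOf] at hpf
        exact hlast (by simp [← hpf])
      | cons d a'' =>
        simp [List.isPrefixOf] at hpf
        exact ha ⟨[], a'', by simp [← hpf.1, ← hpf.2]⟩
    rw [List.cons_append, pvSplit, dif_neg (by simp), dif_neg (by simp [hpre])]
    show pvConsApp [c] (pvSplit ['|', '|'] (a' ++ '|' :: '|' :: r)) = _
    have ha' : ¬ ['|', '|'] <:+: a' := fun hi => ha (List.infix_cons hi)
    have hlast' : a'.getLast? ≠ some '|' := by
      cases a' with
      | nil => simp
      | cons d a'' =>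
        rw [← List.getLast?_cons_cons (a := c)] -- getLast? (c::d::a'') = getLast? (d::a'')
        exact hlast
    rw [ih ha' hlast']
    rfl

-- the normalization A computes, phrased over pvSplit
def pvNormRow (r : List Char) : List Char :=
  PySem.Chars.join ['|', '|'] ((pvSplit ['|', '|'] r).map PySem.Chars.strip)

def pvNorm (s : List Char) : List Char :=
  PySem.Chars.join ['\n'] ((pvSplit ['\n'] s).map pvNormRow)

theorem pvNormRow_of_not_infix (s : List Char) (h : ¬ ['|', '|'] <:+: s) :
    pvNormRow s = PySem.Chars.strip s := by
  rw [pvNormRow, pvSplit_not_infix _ _ (by simp) h, List.map_singleton,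
    PySem.Chars.join_singleton]

-- '||' appearing in cur ++ [c] is either inside cur or straddles the last two characters
theorem pvInfix_snoc (cur : List Char) (c : Char) (h : ['|', '|'] <:+: cur ++ [c]) :
    ['|', '|'] <:+: cur ∨ (c = '|' ∧ cur.getLast? = some '|') := by
  have h' : ['|', '|'] <:+: c :: cur.reverse := by
    have := List.reverse_infix.mpr h
    simpa using this
  rcases List.infix_cons_iff.mp h' with hp | hs
  · right
    rcases hp with ⟨t, ht⟩
    cases cur with
    | nil => simp at ht
    | cons d cur' =>
      simp at ht
      refine ⟨ht.1.symm, ?_⟩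
      rw [← List.head?_reverse, List.reverse_cons, ← ht.2]
      rfl
  · left
    exact List.reverse_infix.mp (by simpa using hs)

theorem pvScan_nil (cur : List Char) (h1 : '\n' ∉ cur) (h2 : ¬ ['|', '|'] <:+: cur) :
    pvScan [] cur = pvNorm cur := by
  rw [pvScan, pvNorm]
  rw [pvSplit_not_infix _ _ (by simp) (by rw [List.singleton_infix_iff]; exact h1)]
  rw [List.map_singleton, PySem.Chars.join_singleton, pvNormRow_of_not_infix cur h2]

theorem pvScan_eq (n : Nat) : ∀ l cur, l.length ≤ n →
    '\n' ∉ cur → ¬ ['|', '|'] <:+: cur →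
    (cur.getLast? = some '|' → l.head? ≠ some '|') →
    pvScan l cur = pvNorm (cur ++ l) := by
  induction n with
  | zero =>
    intro l cur hlen h1 h2 h3
    have : l = [] := List.eq_nil_of_length_eq_zero (Nat.le_zero.mp hlen)
    subst this
    rw [List.append_nil]
    exact pvScan_nil cur h1 h2
  | succ n ih =>
    intro l cur hlen h1 h2 h3
    cases l with
    | nil =>
      rw [List.append_nil]
      exact pvScan_nil cur h1 h2
    | cons c rest =>
      rw [pvScan]
      by_cases hc : c = '\n'
      · subst hc
        rw [if_pos rfl]
        rw [ih rest [] (by simp at hlen ⊢; omega) (by simp) (by simp) (by simp)]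
        rw [pvNorm, pvNorm, List.nil_append]
        rw [pvSplit_single_append '\n' cur ('\n' :: rest) h1]
        conv_rhs => rw [pvSplit]
        rw [dif_neg (by simp), dif_pos ⟨by rw [List.isPrefixOf]; simp [List.isPrefixOf], by simp⟩]
        simp only [List.length_cons, List.length_nil, List.drop_succ_cons, List.drop_zero]
        cases hps : pvSplit ['\n'] rest with
        | nil => exact absurd hps (pvSplit_ne_nil _ _)
        | cons p t =>
          simp only [pvConsApp, List.map_cons, List.append_nil]
          rw [PySem.Chars.join_cons_cons, pvNormRow_of_not_infix cur h2]
          simp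
      · rw [if_neg hc]
        by_cases hb : c = '|' ∧ rest.head? = some '|'
        · rw [if_pos hb]
          obtain ⟨hc1, hc2⟩ := hb
          subst hc1
          cases rest with
          | nil => simp at hc2
          | cons d rest' =>
            have hd : d = '|' := by simpa using hc2
            subst hd
            simp only [List.tail_cons]
            rw [ih rest' [] (by simp at hlen ⊢; omega) (by simp) (by simp) (by simp)]
            have hlastbar : cur.getLast? ≠ some '|' := fun hl => h3 hl rfl
            rw [pvNorm, pvNorm, List.nil_append]
            have hrw : cur ++ '|' :: '|' :: rest' = (cur ++ ['|', '|']) ++ rest' := by simp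
            rw [hrw, pvSplit_single_append '\n' (cur ++ ['|', '|']) rest'
              (by simp [h1])]
            cases hps : pvSplit ['\n'] rest' with
            | nil => exact absurd hps (pvSplit_ne_nil _ _)
            | cons p t =>
              simp only [pvConsApp, List.map_cons]
              have hrow : pvNormRow (cur ++ ['|', '|'] ++ p) =
                  PySem.Chars.strip cur ++ '|' :: '|' :: pvNormRow p := by
                rw [pvNormRow, List.append_assoc]
                have : cur ++ (['|', '|'] ++ p) = cur ++ '|' :: '|' :: p := by simp
                rw [this, pvSplit_bar cur p h2 hlastbar]
                rw [pvNormRow]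
                cases hq : pvSplit ['|', '|'] p with
                | nil => exact absurd hq (pvSplit_ne_nil _ _)
                | cons q u =>
                  simp only [List.map_cons]
                  rw [PySem.Chars.join_cons_cons]
                  simp
              rw [hrow]
              cases t with
              | nil =>
                simp only [List.map_nil]
                rw [PySem.Chars.join_singleton, PySem.Chars.join_singleton]
              | cons x u =>
                simp only [List.map_cons]
                rw [PySem.Chars.join_cons_cons, PySem.Chars.join_cons_cons]
                simp
        · rw [if_neg hb]
          have hinv2 : ¬ ['|', '|'] <:+: cur ++ [c] := by
            intro hi
            rcases pvInfix_snoc cur c hi with hi' | ⟨hc1, hl⟩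
            · exact h2 hi'
            · exact h3 hl (by simp [hc1])
          rw [ih rest (cur ++ [c]) (by simp at hlen ⊢; omega)
            (by simp [h1]; exact fun h => hc h.symm) hinv2
            (by
              intro hl hh
              simp at hl
              exact hb ⟨hl, hh⟩)]
          simp

theorem pvMain (p : List Char) : pvScan p [] = pvNorm p := by
  simpa using pvScan_eq p.length p [] (le_refl _) (by simp) (by simp) (by simp)

-- ===== VERDICT (by name: the statement is the Claim_ definition above) =====
theorem evaluate_one_py_spec : Claim_equal_evaluate_one_py := by
  intro y_true y_pred _
  unfold Spec_evaluate_one_py evaluate_one_py evaluate_one_py_alt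
  have hrow : (fun row => PySem.Chars.join ['|', '|']
      ((PySem.Chars.splitOn row ['|', '|']).map PySem.Chars.strip)) = pvNormRow := by
    funext row
    rw [pvSplitOn_eq _ _ (by simp), pvNormRow]
  simp only [pvSplitOn_eq _ _ (by simp : ('\n' :: [] : List Char) ≠ []), hrow]
  rw [show PySem.Chars.join ['\n'] ((pvSplit ['\n'] y_pred.toList).map pvNormRow) =
      pvNorm y_pred.toList from rfl, ← pvMain]
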